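-- pv_equiv track=rewrite | github.com/leroux/liminal | explore/effects/j_chaos_math.py | _expand_lsystem
-- ===== SOURCE A (Python) =====
-- def _expand_lsystem(axiom, rules, iterations):
--     """Expand L-system grammar for given iterations."""
--     current = axiom
--     for _ in range(iterations):
--         next_str = []
--         for ch in current:
--             if ch in rules:
--                 next_str.append(rules[ch])
--             else:
--                 next_str.append(ch)
--         current = ''.join(next_str)
--     return current
-- ===== SOURCE B (Python) =====
-- def _expand_lsystem(axiom, rules, iterations):
--     """Expand L-system grammar depth-first with an explicit stack.
--
--     Each (char, depth) entry is either emitted (depth exhausted, or the char has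
--     no rule and is therefore stable under every further rewrite) or replaced by
--     its rule's characters one level deeper.  Depth-first order yields exactly
--     the level-by-level expansion.
--     """
--     out = []
--     stack = [(c, iterations) for c in reversed(axiom)]
--     while stack:
--         ch, n = stack.pop()
--         if n <= 0 or ch not in rules:
--             out.append(ch)
--         else:
--             stack.extend((c, n - 1) for c in reversed(rules[ch]))
--     return ''.join(out)
-- ===== Notes on version B (the rewrite author's own statement) =====
-- stated objective: faster
-- what changed: Replaced the level-by-level loop that rebuilds the entire string once per iteration with an explicit-stack depth-first expansion that emits each character fully expanded to the target depth, emitting a rule-less (hence stable) character immediately instead of recopying it every iteration.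
import Mathlib
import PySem

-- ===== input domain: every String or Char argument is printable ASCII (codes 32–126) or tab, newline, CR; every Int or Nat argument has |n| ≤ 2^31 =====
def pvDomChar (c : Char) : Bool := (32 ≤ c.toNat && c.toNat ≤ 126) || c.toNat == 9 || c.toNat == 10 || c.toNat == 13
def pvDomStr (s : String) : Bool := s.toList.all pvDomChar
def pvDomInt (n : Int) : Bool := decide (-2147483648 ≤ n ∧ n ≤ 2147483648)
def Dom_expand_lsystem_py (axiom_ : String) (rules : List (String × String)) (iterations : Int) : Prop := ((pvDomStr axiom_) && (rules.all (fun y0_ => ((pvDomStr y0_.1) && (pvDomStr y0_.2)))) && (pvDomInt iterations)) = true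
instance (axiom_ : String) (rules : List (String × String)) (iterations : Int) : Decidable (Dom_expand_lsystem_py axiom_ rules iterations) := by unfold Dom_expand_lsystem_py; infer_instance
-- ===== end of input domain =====

-- B replaces A's level-by-level rewrite loop with an explicit-stack depth-first
-- expansion (alternative decomposition; same exact output).

-- ===== PORT A =====
-- Port of A: for _ in range(iterations): rebuild current by an inner loop appending
-- rules[ch] (first-match lookup in the association list = Python dict) or ch, then join.
def expand_lsystem_py (axiom_ : String) (rules : List (String × String)) (iterations : Int) : String :=
  String.ofList ((PySem.List.pyRange 0 iterations 1).foldl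
    (fun current _ =>
      (current.foldl (fun acc ch =>
        match List.lookup (String.ofList [ch]) rules with
        | some r => acc ++ [r.toList]   -- ch in rules: append rules[ch]
        | none   => acc ++ [[ch]])      -- else: append ch
        []).flatten)                    -- ''.join(next_str)
    axiom_.toList)

-- ===== PORT B =====
-- first-match association-list lookup (Python dict lookup), membership fact for the bound
theorem pvLookup_mem {l : List (String × String)} {k v : String}
    (h : List.lookup k l = some v) : (k, v) ∈ l := by
  induction l with
  | nil => simp [List.lookup] at h
  | cons p l ih =>
      rcases p with ⟨pk, pv⟩
      rw [List.lookup] at h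
      by_cases hk : k == pk
      · have hkk : k = pk := beq_iff_eq.mp hk
        subst hkk
        simp at h
        subst h
        exact List.mem_cons_self ..
      · simp [hk] at h
        exact List.mem_cons_of_mem _ (ih h)

-- 1 + the longest rule right-hand side: every pushed rule body is strictly shorter,
-- which gives the loop's termination measure (sum of base^depth over the stack).
def pvBase (rules : List (String × String)) : Nat :=
  rules.foldl (fun m p => max m p.2.length) 0 + 1

theorem pvBase_foldl_le (rules : List (String × String)) (a : Nat) :
    a ≤ rules.foldl (fun m p => max m p.2.length) a := by
  induction rules generalizing a with
  | nil => exact le_rfl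
  | cons p rules ih => exact le_trans (le_max_left _ _) (ih _)

theorem pvBase_mem_le (rules : List (String × String)) (k r : String)
    (h : (k, r) ∈ rules) :
    ∀ a, r.length ≤ rules.foldl (fun m p => max m p.2.length) a := by
  induction rules with
  | nil => cases h
  | cons p rules ih =>
      intro a
      simp only [List.foldl_cons]
      rcases List.mem_cons.mp h with h | h
      · subst h
        exact le_trans (le_max_right _ _) (pvBase_foldl_le rules _)
      · exact ih h _

theorem pvBase_lt (rules : List (String × String)) (k r : String)
    (h : (k, r) ∈ rules) : r.toList.length < pvBase rules := by
  unfold pvBase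
  have hle := pvBase_mem_le rules k r h 0
  have hl : r.toList.length = r.length := String.length_toList ..
  omega

theorem pvSumConst (l : List Char) (c : Nat) :
    (l.map (fun _ => c)).sum = l.length * c := by
  induction l with
  | nil => simp
  | cons x l ih => simp; ring

def pvMeasure (base : Nat) (stack : List (Char × Nat)) : Nat :=
  (stack.map (fun p => base ^ p.2)).sum

-- the while loop of B: pop from the stack (front of the list = reversed-Python top
-- = next axiom/rule character in order), emit or push the rule body one level deeper
def pvLoop (rules : List (String × String)) : List (Char × Nat) → List Char → List Char
  | [], out => out
  | (ch, 0) :: stack, out => pvLoop rules stack (out ++ [ch])     -- n <= 0: emit ch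
  | (ch, m + 1) :: stack, out =>
      match hr : List.lookup (String.ofList [ch]) rules with
      | none => pvLoop rules stack (out ++ [ch])                  -- ch not in rules: emit ch
      | some r =>                                                 -- push rules[ch] at depth n-1
          pvLoop rules (r.toList.map (fun c => (c, m)) ++ stack) out
termination_by stack _ => pvMeasure (pvBase rules) stack
decreasing_by
  · simp only [pvMeasure, List.map_cons, List.sum_cons, pow_zero]
    omega
  · simp only [pvMeasure, List.map_cons, List.sum_cons]
    have hb : 0 < pvBase rules := by unfold pvBase; omega
    exact Nat.lt_add_of_pos_left (Nat.one_le_pow _ _ hb)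
  · simp only [pvMeasure, List.map_append, List.map_map, List.sum_append, List.map_cons,
      List.sum_cons, Function.comp_def, Nat.succ_eq_add_one]
    have hb : 0 < pvBase rules := by unfold pvBase; omega
    have hlt : r.toList.length < pvBase rules :=
      pvBase_lt rules _ _ (pvLookup_mem hr)
    have hsum : ((r.toList.map (fun _ => pvBase rules ^ m)).sum)
        = r.toList.length * pvBase rules ^ m := pvSumConst _ _
    have hpow : r.toList.length * pvBase rules ^ m < pvBase rules ^ (m + 1) := by
      calc r.toList.length * pvBase rules ^ m
          < pvBase rules * pvBase rules ^ m :=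
            Nat.mul_lt_mul_of_pos_right hlt (Nat.pow_pos hb)
        _ = pvBase rules ^ (m + 1) := by ring
    omega

-- the stack is seeded with the axiom's characters at the full depth (Source B's 'n <= 0'
-- guard makes the effective depth max(iterations, 0) = iterations.toNat)
def expand_lsystem_py_alt (axiom_ : String) (rules : List (String × String)) (iterations : Int) : String :=
  String.ofList (pvLoop rules (axiom_.toList.map (fun c => (c, iterations.toNat))) [])

-- ===== PRECONDITION & SPEC =====
def Spec_expand_lsystem_py (axiom_ : String) (rules : List (String × String)) (iterations : Int) (out : String) : Prop := out = expand_lsystem_py_alt axiom_ rules iterations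
instance (axiom_ : String) (rules : List (String × String)) (iterations : Int) (out : String) : Decidable (Spec_expand_lsystem_py axiom_ rules iterations out) := by unfold Spec_expand_lsystem_py; infer_instance

-- ===== CLAIM (what is proved, stated in full; the proofs are below) =====
def Claim_equal_expand_lsystem_py : Prop := ∀ (axiom_ : String) (rules : List (String × String)) (iterations : Int), Dom_expand_lsystem_py axiom_ rules iterations → Spec_expand_lsystem_py axiom_ rules iterations (expand_lsystem_py axiom_ rules iterations)

-- ===== LEMMAS AND PROOFS =====

-- full expansion of one character to a given depth (the recursive specification
-- both ports are reduced to)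
def pvExpand (rules : List (String × String)) : Nat → Char → List Char
  | 0, ch => [ch]
  | n+1, ch =>
      (((List.lookup (String.ofList [ch]) rules).getD (String.ofList [ch])).toList.map
        (pvExpand rules n)).flatten

-- one substitution of a character
def pvSub (rules : List (String × String)) (ch : Char) : List Char :=
  ((List.lookup (String.ofList [ch]) rules).getD (String.ofList [ch])).toList

-- one level of rewriting
def pvStep (rules : List (String × String)) (cur : List Char) : List Char :=
  (cur.map (pvSub rules)).flatten

-- A's inner loop accumulates exactly the per-character substitutions
theorem pvInnerA (rules : List (String × String)) (cur : List Char)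
    (acc : List (List Char)) :
    cur.foldl (fun acc ch =>
        match List.lookup (String.ofList [ch]) rules with
        | some r => acc ++ [r.toList]
        | none   => acc ++ [[ch]]) acc
      = acc ++ cur.map (fun ch => pvSub rules ch) := by
  induction cur generalizing acc with
  | nil => simp
  | cons ch cur ih =>
      have h : (match List.lookup (String.ofList [ch]) rules with
          | some r => acc ++ [r.toList]
          | none   => acc ++ [[ch]]) = acc ++ [pvSub rules ch] := by
        unfold pvSub
        cases List.lookup (String.ofList [ch]) rules <;> simp [String.toList_ofList]
      simp only [List.foldl_cons, h, ih, List.map_cons, List.append_assoc,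
        List.singleton_append]

-- a fold that ignores its elements is an iterate
theorem pvFoldIter {α β : Type} (f : α → α) (l : List β) (s : α) :
    l.foldl (fun c _ => f c) s = f^[l.length] s := by
  induction l generalizing s with
  | nil => rfl
  | cons x l ih => simp [List.foldl_cons, ih, Function.iterate_succ_apply]

-- whole-string depth-first expansion
def pvE (rules : List (String × String)) (n : Nat) (cur : List Char) : List Char :=
  (cur.map (pvExpand rules n)).flatten

theorem pvE_zero (rules : List (String × String)) (cur : List Char) :
    pvE rules 0 cur = cur := by
  induction cur with
  | nil => rfl
  | cons ch cur ih => simp [pvE, pvExpand] at ih ⊢; exact ih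

theorem pvE_append (rules : List (String × String)) (n : Nat) (a b : List Char) :
    pvE rules n (a ++ b) = pvE rules n a ++ pvE rules n b := by
  simp [pvE]

theorem pvE_succ (rules : List (String × String)) (n : Nat) (cur : List Char) :
    pvE rules (n + 1) cur = pvE rules n (pvStep rules cur) := by
  induction cur with
  | nil => rfl
  | cons ch cur ih =>
      have hstep : pvStep rules (ch :: cur) = pvSub rules ch ++ pvStep rules cur := by
        simp [pvStep]
      have hhd : pvExpand rules (n + 1) ch = pvE rules n (pvSub rules ch) := by
        simp [pvExpand, pvE, pvSub]
      calc pvE rules (n + 1) (ch :: cur)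
          = pvExpand rules (n + 1) ch ++ pvE rules (n + 1) cur := by simp [pvE]
        _ = pvE rules n (pvSub rules ch) ++ pvE rules n (pvStep rules cur) := by
              rw [hhd, ih]
        _ = pvE rules n (pvStep rules (ch :: cur)) := by
              rw [hstep, pvE_append]

theorem pvE_iterate (rules : List (String × String)) (n : Nat) (cur : List Char) :
    pvE rules n cur = (pvStep rules)^[n] cur := by
  induction n generalizing cur with
  | zero => simpa using pvE_zero rules cur
  | succ n ih => rw [pvE_succ, ih, ← Function.iterate_succ_apply]

-- a rule-less character is stable at every depth (B's shortcut is sound)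
theorem pvExpand_no_rule (rules : List (String × String)) (ch : Char)
    (h : List.lookup (String.ofList [ch]) rules = none) :
    ∀ n, pvExpand rules n ch = [ch] := by
  intro n
  induction n with
  | zero => rfl
  | succ n ih => simp [pvExpand, h, String.toList_ofList, ih]

-- the stack loop emits exactly the full expansions of its entries, in order
theorem pvLoop_spec (rules : List (String × String)) :
    ∀ (stack : List (Char × Nat)) (out : List Char),
      pvLoop rules stack out = out ++ (stack.map (fun p => pvExpand rules p.2 p.1)).flatten := by
  intro stack out
  fun_induction pvLoop rules stack out with
  | case1 out => simp
  | case2 ch stack out ih =>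
      simp only [ih, List.map_cons, List.flatten_cons, pvExpand,
        List.append_assoc, List.singleton_append]
  | case3 ch m stack out hr ih =>
      simp only [ih]
      have h : pvExpand rules (m + 1) ch = [ch] := pvExpand_no_rule rules ch hr (m + 1)
      simp [h]
  | case4 ch m stack out r hr ih =>
      simp only [ih]
      have hexp : pvExpand rules (m + 1) ch = (r.toList.map (pvExpand rules m)).flatten := by
        simp [pvExpand, hr]
      simp [hexp, List.map_map, Function.comp_def]

-- ===== VERDICT (by name: the statement is the Claim_ definition above) =====
theorem expand_lsystem_py_spec : Claim_equal_expand_lsystem_py := by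
  intro axiom_ rules iterations _
  unfold Spec_expand_lsystem_py expand_lsystem_py expand_lsystem_py_alt
  have hlen : (PySem.List.pyRange 0 iterations 1).length = iterations.toNat := by
    simp [PySem.List.length_pyRange_one]
  have hbody : ∀ current : List Char,
      (current.foldl (fun acc ch =>
        match List.lookup (String.ofList [ch]) rules with
        | some r => acc ++ [r.toList]
        | none   => acc ++ [[ch]]) ([] : List (List Char))).flatten
      = pvStep rules current := by
    intro current
    rw [pvInnerA]
    simp [pvStep]
  have hiter := pvE_iterate rules iterations.toNat axiom_.toList
  have hloop := pvLoop_spec rules (axiom_.toList.map (fun c => (c, iterations.toNat))) []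
  simp only [hbody, pvFoldIter (pvStep rules), hlen]
  rw [hloop]
  simp only [List.map_map, Function.comp_def, List.nil_append]
  rw [show (axiom_.toList.map (fun c => pvExpand rules iterations.toNat c)).flatten
        = pvE rules iterations.toNat axiom_.toList from rfl, hiter]
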